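-- pv_equiv track=rewrite | github.com/RideSVEL/python-labs | lab3/lab3-2.py | checkFirstIf
-- ===== SOURCE A (Python) =====
-- def checkFirstIf(inputList):
--     indexes = []
--     for i in range(1, len(inputList) - 1):
--         temp = inputList[i]
--         firstCheck = True
--         for j in range(0, i):
--             if temp < inputList[j]:
--                 firstCheck = False
--         secondCheck = False
--         if firstCheck:
--             secondCheck = True
--             for j in range(i + 1, len(inputList)):
--                 if temp > inputList[j]:
--                     secondCheck = False
--         if secondCheck:
--             indexes.append(i)
--     return indexes
-- ===== SOURCE B (Python) =====
-- def checkFirstIf(inputList):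
--     # prefix maxima: premax[k] = max(inputList[:k+1]); suffix minima: sufmin[k] = min(inputList[k:])
--     premax = []
--     for x in inputList:
--         premax.append(x if not premax else max(x, premax[-1]))
--     sufmin = []
--     for x in reversed(inputList):
--         sufmin.append(x if not sufmin else min(x, sufmin[-1]))
--     sufmin.reverse()
--     return [i for i in range(1, len(inputList) - 1)
--             if premax[i - 1] <= inputList[i] <= sufmin[i + 1]]
-- ===== Notes on version B (the rewrite author's own statement) =====
-- stated objective: faster
-- what changed: Replaced the per-index rescans of the whole prefix and suffix by prefix-max and suffix-min arrays built in one pass each, followed by a single linear filter.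
import Mathlib
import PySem

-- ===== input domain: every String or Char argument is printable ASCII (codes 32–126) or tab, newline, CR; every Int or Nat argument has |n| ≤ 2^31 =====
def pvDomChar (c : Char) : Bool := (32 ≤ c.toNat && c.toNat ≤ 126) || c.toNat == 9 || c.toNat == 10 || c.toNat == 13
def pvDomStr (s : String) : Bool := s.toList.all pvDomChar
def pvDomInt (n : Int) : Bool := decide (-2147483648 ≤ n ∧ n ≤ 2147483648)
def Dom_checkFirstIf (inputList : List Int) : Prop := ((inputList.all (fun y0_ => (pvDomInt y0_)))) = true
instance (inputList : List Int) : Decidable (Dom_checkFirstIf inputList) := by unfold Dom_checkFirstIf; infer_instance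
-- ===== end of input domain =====

-- B replaces A's quadratic per-index rescans by prefix-max / suffix-min arrays and one linear filter (objective: faster).

-- ===== PORT A =====
def checkFirstIf (inputList : List Int) : List Int :=
  (PySem.List.pyRange 1 ((inputList.length : Int) - 1) 1).foldl (fun indexes i =>
    let temp := PySem.List.pyGetD inputList i 0
    let firstCheck := (PySem.List.pyRange 0 i 1).foldl
      (fun fc j => if temp < PySem.List.pyGetD inputList j 0 then false else fc) true
    let secondCheck :=
      if firstCheck then
        (PySem.List.pyRange (i + 1) ((inputList.length : Int)) 1).foldl
          (fun sc j => if PySem.List.pyGetD inputList j 0 < temp then false else sc) true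
      else false
    if secondCheck then indexes ++ [i] else indexes) []

-- ===== PORT B =====
-- 'premax' loop of Source B: running maximum appended front-to-back
def scanMax (cur : Int) : List Int → List Int
  | [] => [cur]
  | x :: rest => cur :: scanMax (max x cur) rest

def preMaxs : List Int → List Int
  | [] => []
  | x :: rest => scanMax x rest

-- 'sufmin' loop of Source B: running minimum over the reversed list, reversed back
def sufMins : List Int → List Int
  | [] => []
  | x :: rest =>
    match sufMins rest with
    | [] => [x]
    | m :: tail => min x m :: m :: tail

def checkFirstIf_alt (inputList : List Int) : List Int :=
  let premax := preMaxs inputList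
  let sufmin := sufMins inputList
  (PySem.List.pyRange 1 ((inputList.length : Int) - 1) 1).filter (fun i =>
    decide (PySem.List.pyGetD premax (i - 1) 0 ≤ PySem.List.pyGetD inputList i 0 ∧
            PySem.List.pyGetD inputList i 0 ≤ PySem.List.pyGetD sufmin (i + 1) 0))

-- ===== PRECONDITION & SPEC =====
def Spec_checkFirstIf (inputList : List Int) (out : List Int) : Prop := out = checkFirstIf_alt inputList
instance (inputList : List Int) (out : List Int) : Decidable (Spec_checkFirstIf inputList out) := by unfold Spec_checkFirstIf; infer_instance

-- ===== CLAIM (what is proved, stated in full; the proofs are below) =====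
def Claim_equal_checkFirstIf : Prop := ∀ (inputList : List Int), Dom_checkFirstIf inputList → Spec_checkFirstIf inputList (checkFirstIf inputList)

-- ===== LEMMAS AND PROOFS =====

-- A's inner 'if cond: flag = False' loops compute an 'all'
theorem foldl_if_false (p : Int → Prop) [DecidablePred p] (l : List Int) (b : Bool) :
    l.foldl (fun fc j => if p j then false else fc) b = (b && l.all (fun j => !decide (p j))) := by
  induction l generalizing b with
  | nil => simp
  | cons x xs ih =>
    rw [List.foldl_cons, ih, List.all_cons]
    by_cases h : p x <;> cases b <;> simp [h]

theorem scanMax_getD_le : ∀ (rest : List Int) (cur : Int) (k : Nat), k ≤ rest.length → ∀ c : Int,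
    ((scanMax cur rest).getD k 0 ≤ c ↔ cur ≤ c ∧ ∀ j < k, rest.getD j 0 ≤ c) := by
  intro rest
  induction rest with
  | nil =>
    intro cur k hk c
    simp only [List.length_nil, Nat.le_zero] at hk
    subst hk
    simp [scanMax]
  | cons y rest ih =>
    intro cur k hk c
    cases k with
    | zero => simp [scanMax]
    | succ k =>
      simp only [scanMax, List.getD_cons_succ]
      rw [ih (max y cur) k (by simpa using hk) c]
      constructor
      · rintro ⟨h1, h2⟩
        refine ⟨le_of_max_le_right h1, ?_⟩
        intro j hj
        cases j with
        | zero => simpa using le_of_max_le_left h1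
        | succ j => exact h2 j (by omega)
      · rintro ⟨h1, h2⟩
        refine ⟨max_le (by simpa using h2 0 (by omega)) h1, ?_⟩
        intro j hj
        exact h2 (j + 1) (by omega)

theorem sufMins_length : ∀ (xs : List Int), (sufMins xs).length = xs.length := by
  intro xs
  induction xs with
  | nil => simp [sufMins]
  | cons x rest ih =>
    cases h : sufMins rest with
    | nil =>
      rw [h] at ih
      simp [sufMins, h, ← ih]
    | cons m tail =>
      rw [h] at ih
      simp [sufMins, h, ← ih]

theorem le_sufMins_getD : ∀ (xs : List Int) (k : Nat), k < xs.length → ∀ c : Int,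
    (c ≤ (sufMins xs).getD k 0 ↔ ∀ j, k ≤ j → j < xs.length → c ≤ xs.getD j 0) := by
  intro xs
  induction xs with
  | nil => intro k hk c; simp at hk
  | cons x rest ih =>
    intro k hk c
    cases hr : sufMins rest with
    | nil =>
      have hlen := sufMins_length rest
      rw [hr] at hlen
      have hrest : rest = [] := by
        cases rest with
        | nil => rfl
        | cons a l => simp at hlen
      subst hrest
      have hk0 : k = 0 := by simpa using hk
      subst hk0
      simp only [sufMins, List.getD_cons_zero, List.length_cons, List.length_nil]
      constructor
      · intro h j _ hj
        have : j = 0 := by omega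
        subst this
        simpa using h
      · intro h
        simpa using h 0 (by omega) (by omega)
    | cons m tail =>
      have hlen : rest.length = tail.length + 1 := by simpa [hr] using (sufMins_length rest).symm
      cases k with
      | zero =>
        simp only [sufMins, hr, List.getD_cons_zero, le_min_iff]
        rw [show m = (sufMins rest).getD 0 0 by simp [hr]]
        rw [ih 0 (by omega) c]
        constructor
        · rintro ⟨h1, h2⟩ j _ hj
          cases j with
          | zero => simpa using h1
          | succ j => simpa using h2 j (by omega) (by simp at hj; omega)
        · intro h
          refine ⟨by simpa using h 0 (by omega) (by simp), ?_⟩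
          intro j _ hj
          simpa using h (j + 1) (by omega) (by simp; omega)
      | succ k =>
        simp only [sufMins, hr, List.getD_cons_succ]
        rw [show (m :: tail) = sufMins rest from hr.symm]
        rw [ih k (by simp at hk; omega) c]
        constructor
        · intro h j hj1 hj2
          cases j with
          | zero => omega
          | succ j => simpa using h j (by omega) (by simp at hj2; omega)
        · intro h j hj1 hj2
          simpa using h (j + 1) (by omega) (by simp; omega)

-- the per-index condition of A, named for the filter rewrite
def condA (xs : List Int) (i : Int) : Bool :=
  let temp := PySem.List.pyGetD xs i 0
  let firstCheck := (PySem.List.pyRange 0 i 1).foldl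
    (fun fc j => if temp < PySem.List.pyGetD xs j 0 then false else fc) true
  if firstCheck then
    (PySem.List.pyRange (i + 1) ((xs.length : Int)) 1).foldl
      (fun sc j => if PySem.List.pyGetD xs j 0 < temp then false else sc) true
  else false

def condB (xs : List Int) (i : Int) : Bool :=
  decide (PySem.List.pyGetD (preMaxs xs) (i - 1) 0 ≤ PySem.List.pyGetD xs i 0 ∧
          PySem.List.pyGetD xs i 0 ≤ PySem.List.pyGetD (sufMins xs) (i + 1) 0)

theorem condA_eq_condB (xs : List Int) (i : Int)
    (hi : i ∈ PySem.List.pyRange 1 ((xs.length : Int) - 1) 1) : condA xs i = condB xs i := by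
  obtain ⟨hi1, hi2⟩ := PySem.List.mem_pyRange_one.mp hi
  -- i = (k : Nat) with 1 ≤ k and k + 1 < xs.length
  obtain ⟨k, rfl⟩ : ∃ k : Nat, i = (k : Int) := ⟨i.toNat, (Int.toNat_of_nonneg (by omega)).symm⟩
  have hk1 : 1 ≤ k := by exact_mod_cast hi1
  have hk2 : k + 1 < xs.length := by omega
  obtain ⟨x, rest, rfl⟩ : ∃ x rest, xs = x :: rest := by
    cases xs with
    | nil => simp at hk2
    | cons a l => exact ⟨a, l, rfl⟩
  rw [Bool.eq_iff_iff]
  unfold condA condB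
  simp only [foldl_if_false, Bool.true_and, Bool.and_eq_true, Bool.if_false_right,
    List.all_eq_true, decide_eq_true_eq]
  rw [PySem.List.pyGetD_natCast]
  constructor
  · rintro ⟨h1, h2⟩
    constructor
    · -- prefix: premax[k-1] ≤ temp
      rw [show (k : Int) - 1 = ((k - 1 : Nat) : Int) by omega, PySem.List.pyGetD_natCast]
      show (scanMax x rest).getD (k - 1) 0 ≤ _
      rw [scanMax_getD_le rest x (k - 1) (by simp at hk2; omega)]
      constructor
      · have := h1 ((0 : Nat) : Int) (PySem.List.mem_pyRange_one.mpr ⟨by omega, by exact_mod_cast hk1⟩)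
        simp only [PySem.List.pyGetD_natCast] at this
        simpa using not_lt.mp (by simpa using this)
      · intro j hj
        have := h1 ((j + 1 : Nat) : Int)
          (PySem.List.mem_pyRange_one.mpr ⟨by omega, by exact_mod_cast (by omega : j + 1 < k)⟩)
        simp only [PySem.List.pyGetD_natCast] at this
        simpa using not_lt.mp (by simpa using this)
    · -- suffix: temp ≤ sufmin[k+1]
      rw [show (k : Int) + 1 = ((k + 1 : Nat) : Int) by omega, PySem.List.pyGetD_natCast]
      rw [le_sufMins_getD (x :: rest) (k + 1) hk2]
      intro j hj1 hj2
      have := h2 ((j : Nat) : Int)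
        (PySem.List.mem_pyRange_one.mpr ⟨by exact_mod_cast hj1, by exact_mod_cast hj2⟩)
      simp only [PySem.List.pyGetD_natCast] at this
      simpa using not_lt.mp (by simpa using this)
  · rintro ⟨h1, h2⟩
    rw [show (k : Int) - 1 = ((k - 1 : Nat) : Int) by omega, PySem.List.pyGetD_natCast] at h1
    rw [show (k : Int) + 1 = ((k + 1 : Nat) : Int) by omega, PySem.List.pyGetD_natCast] at h2
    replace h1 := (scanMax_getD_le rest x (k - 1) (by simp at hk2; omega) _).mp h1
    rw [le_sufMins_getD (x :: rest) (k + 1) hk2] at h2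
    constructor
    · intro j hj
      obtain ⟨hj0, hjk⟩ := PySem.List.mem_pyRange_one.mp hj
      obtain ⟨m, rfl⟩ : ∃ m : Nat, j = (m : Int) := ⟨j.toNat, (Int.toNat_of_nonneg hj0).symm⟩
      have hm : m < k := by exact_mod_cast hjk
      rw [PySem.List.pyGetD_natCast]
      cases m with
      | zero => simpa using not_lt.mpr h1.1
      | succ m => simpa using not_lt.mpr (h1.2 m (by omega))
    · intro j hj
      obtain ⟨hj0, hjn⟩ := PySem.List.mem_pyRange_one.mp hj
      obtain ⟨m, rfl⟩ : ∃ m : Nat, j = (m : Int) := ⟨j.toNat, (Int.toNat_of_nonneg (by omega)).symm⟩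
      rw [PySem.List.pyGetD_natCast]
      simpa using not_lt.mpr (h2 m (by exact_mod_cast hj0) (by exact_mod_cast hjn))

theorem checkFirstIf_eq_filter (xs : List Int) :
    checkFirstIf xs = (PySem.List.pyRange 1 ((xs.length : Int) - 1) 1).filter (condA xs) := by
  show (PySem.List.pyRange 1 ((xs.length : Int) - 1) 1).foldl
      (fun indexes i => if condA xs i then indexes ++ [i] else indexes) [] = _
  rw [PySem.List.foldl_append_if_eq_filter]
  simp

-- ===== VERDICT (by name: the statement is the Claim_ definition above) =====
theorem checkFirstIf_spec : Claim_equal_checkFirstIf := by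
  intro xs _
  show checkFirstIf xs = checkFirstIf_alt xs
  rw [checkFirstIf_eq_filter]
  unfold checkFirstIf_alt
  exact List.filter_congr (fun i hi => condA_eq_condB xs i hi)
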